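-- pv_equiv track=rewrite | github.com/Michael-Franklyn-MDF/python | logic.py | build_character_pool
-- ===== SOURCE A (Python) =====
-- import string
--
-- def build_character_pool(use_uppercase=True, use_lowercase=True, use_numbers=True, use_symbols=True, exclude_ambiguous=False):
--     """
--     Build a character pool for password generation.
--     """
--     characters = ""
--
--     if use_uppercase:
--         characters += string.ascii_uppercase
--     if use_lowercase:
--         characters += string.ascii_lowercase
--     if use_numbers:
--         characters += string.digits
--     if use_symbols:
--         characters += string.punctuation
--
--     if exclude_ambiguous:
--         for ch in "0Ol1I":
--             characters = characters.replace(ch, "")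
--
--     return characters
-- ===== SOURCE B (Python) =====
-- import string
--
-- # All candidate characters in the canonical order: uppercase, lowercase, digits, punctuation.
-- _MASTER = string.ascii_uppercase + string.ascii_lowercase + string.digits + string.punctuation
--
-- def _class_enabled(c, use_uppercase, use_lowercase, use_numbers, use_symbols):
--     """Whether character c's class (upper/lower/digit/symbol) is enabled."""
--     if 'A' <= c <= 'Z':
--         return use_uppercase
--     elif 'a' <= c <= 'z':
--         return use_lowercase
--     elif '0' <= c <= '9':
--         return use_numbers
--     else:
--         return use_symbols
--
-- def build_character_pool(use_uppercase=True, use_lowercase=True, use_numbers=True, use_symbols=True, exclude_ambiguous=False):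
--     """
--     Build a character pool for password generation.
--
--     Single pass over the fixed master alphabet: each character is classified
--     and kept iff its class is enabled and it is not an excluded ambiguous one.
--     """
--     out = []
--     for c in _MASTER:
--         if _class_enabled(c, use_uppercase, use_lowercase, use_numbers, use_symbols) \
--                 and not (exclude_ambiguous and c in "0Ol1I"):
--             out.append(c)
--     return "".join(out)
-- ===== Notes on version B (the rewrite author's own statement) =====
-- stated objective: alternative
-- what changed: Instead of concatenating flag-selected class strings and then deleting ambiguous characters with five full-string replace scans, B makes one classification-driven pass over a fixed master alphabet, keeping each character iff its class flag is enabled and it is not an excluded ambiguous character.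
import Mathlib
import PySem

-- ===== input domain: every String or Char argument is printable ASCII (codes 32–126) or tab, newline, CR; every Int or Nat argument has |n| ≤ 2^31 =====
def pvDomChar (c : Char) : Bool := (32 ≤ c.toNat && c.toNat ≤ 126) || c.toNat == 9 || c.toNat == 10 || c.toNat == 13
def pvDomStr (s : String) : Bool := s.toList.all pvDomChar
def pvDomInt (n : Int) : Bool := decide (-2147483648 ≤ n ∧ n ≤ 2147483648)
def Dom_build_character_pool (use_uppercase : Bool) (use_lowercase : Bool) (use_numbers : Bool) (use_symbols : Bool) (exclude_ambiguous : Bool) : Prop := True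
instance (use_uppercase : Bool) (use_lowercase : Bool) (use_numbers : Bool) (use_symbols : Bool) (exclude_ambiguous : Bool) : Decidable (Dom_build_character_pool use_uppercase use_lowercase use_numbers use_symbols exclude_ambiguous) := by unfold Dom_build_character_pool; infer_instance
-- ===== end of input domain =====

-- ===== PORT A =====
-- B replaces A's four block concatenations + five replace scans by one classification
-- pass over a fixed master alphabet (objective: simpler single-pass decomposition).
def pvUpper : String := "ABCDEFGHIJKLMNOPQRSTUVWXYZ"
def pvLower : String := "abcdefghijklmnopqrstuvwxyz"
def pvDigits : String := "0123456789"
def pvPunct : String := "!\"#$%&'()*+,-./:;<=>?@[\\]^_`{|}~"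

def build_character_pool (use_uppercase : Bool) (use_lowercase : Bool) (use_numbers : Bool) (use_symbols : Bool) (exclude_ambiguous : Bool) : String :=
  let characters := ""
  let characters := if use_uppercase then characters ++ pvUpper else characters
  let characters := if use_lowercase then characters ++ pvLower else characters
  let characters := if use_numbers then characters ++ pvDigits else characters
  let characters := if use_symbols then characters ++ pvPunct else characters
  let characters :=
    if exclude_ambiguous then
      "0Ol1I".toList.foldl (fun acc ch => PySem.Str.replace acc (String.ofList [ch]) "") characters
    else characters
  characters

-- ===== PORT B =====
-- the fixed module-level master alphabet _MASTER
def pvMaster : String := pvUpper ++ pvLower ++ pvDigits ++ pvPunct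

-- helper _class_enabled: which class flag governs character c
def pvClassEnabled (c : Char) (use_uppercase : Bool) (use_lowercase : Bool) (use_numbers : Bool) (use_symbols : Bool) : Bool :=
  if 'A' ≤ c ∧ c ≤ 'Z' then use_uppercase
  else if 'a' ≤ c ∧ c ≤ 'z' then use_lowercase
  else if '0' ≤ c ∧ c ≤ '9' then use_numbers
  else use_symbols

def build_character_pool_alt (use_uppercase : Bool) (use_lowercase : Bool) (use_numbers : Bool) (use_symbols : Bool) (exclude_ambiguous : Bool) : String :=
  let out := pvMaster.toList.foldl (fun acc c =>
    if pvClassEnabled c use_uppercase use_lowercase use_numbers use_symbols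
        && !(exclude_ambiguous && "0Ol1I".toList.contains c) then acc ++ [c] else acc) []
  String.ofList out

-- ===== PRECONDITION & SPEC =====
def Spec_build_character_pool (use_uppercase : Bool) (use_lowercase : Bool) (use_numbers : Bool) (use_symbols : Bool) (exclude_ambiguous : Bool) (out : String) : Prop := out = build_character_pool_alt use_uppercase use_lowercase use_numbers use_symbols exclude_ambiguous
instance (use_uppercase : Bool) (use_lowercase : Bool) (use_numbers : Bool) (use_symbols : Bool) (exclude_ambiguous : Bool) (out : String) : Decidable (Spec_build_character_pool use_uppercase use_lowercase use_numbers use_symbols exclude_ambiguous out) := by unfold Spec_build_character_pool; infer_instance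

-- ===== CLAIM (what is proved, stated in full; the proofs are below) =====
def Claim_equal_build_character_pool : Prop := ∀ (use_uppercase : Bool) (use_lowercase : Bool) (use_numbers : Bool) (use_symbols : Bool) (exclude_ambiguous : Bool), Dom_build_character_pool use_uppercase use_lowercase use_numbers use_symbols exclude_ambiguous → Spec_build_character_pool use_uppercase use_lowercase use_numbers use_symbols exclude_ambiguous (build_character_pool use_uppercase use_lowercase use_numbers use_symbols exclude_ambiguous)

-- ===== LEMMAS AND PROOFS =====

theorem go_single (c : Char) : ∀ (fuel : Nat) (l acc : List Char), l.length ≤ fuel →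
    PySem.Chars.replace.go [c] [] fuel l acc = acc.reverse ++ l.filter (fun x => x != c) := by
  intro fuel
  induction fuel with
  | zero =>
    intro l acc h
    cases l with
    | nil => simp [PySem.Chars.replace.go]
    | cons a t => simp at h
  | succ n ih =>
    intro l acc h
    cases l with
    | nil => simp [PySem.Chars.replace.go]
    | cons a t =>
      rw [PySem.Chars.replace.go]
      by_cases hc : a = c
      · subst hc
        simp [List.isPrefixOf, ih t acc (by simpa using h)]
      · have : ([c].isPrefixOf (a :: t)) = false := by
          simp [List.isPrefixOf]; exact fun h' => (hc h'.symm).elim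
        simp [this, ih t (a :: acc) (by simpa using h), hc]

theorem replace_single (s : List Char) (c : Char) :
    PySem.Chars.replace s [c] [] = s.filter (fun x => x != c) := by
  rw [PySem.Chars.replace]
  simp [go_single c s.length s [] le_rfl]

theorem str_replace_single (s : String) (c : Char) :
    PySem.Str.replace s (String.ofList [c]) "" = String.ofList (s.toList.filter (fun x => x != c)) := by
  simp [PySem.Str.replace, replace_single]

-- A's five sequential single-character replaces collapse to one filtering pass.
theorem foldl_replace (cs : List Char) : ∀ (s : String),
    cs.foldl (fun acc ch => PySem.Str.replace acc (String.ofList [ch]) "") s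
      = String.ofList (s.toList.filter (fun x => !(cs.contains x))) := by
  induction cs with
  | nil => intro s; simp [String.ofList]
  | cons c t ih =>
    intro s
    rw [List.foldl_cons, str_replace_single, ih]
    simp only [String.toList_ofList, List.filter_filter]
    congr 1
    apply List.filter_congr
    intro x _
    cases h : x == c <;> simp_all

-- B's accumulating fold is the filter of the master list.
theorem foldl_keep (p : Char → Bool) : ∀ (l acc : List Char),
    l.foldl (fun acc c => if p c then acc ++ [c] else acc) acc = acc ++ l.filter p := by
  intro l
  induction l with
  | nil => simp
  | cons a t ih =>
    intro acc
    by_cases h : p a <;> simp [h, ih]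

theorem B_eq_filter (u l n s e : Bool) :
    build_character_pool_alt u l n s e
      = String.ofList (pvMaster.toList.filter
          (fun c => pvClassEnabled c u l n s && !(e && "0Ol1I".toList.contains c))) := by
  simp only [build_character_pool_alt]
  rw [foldl_keep (fun c => pvClassEnabled c u l n s && !(e && "0Ol1I".toList.contains c))]
  simp

-- Without the ambiguous-character step the two pools agree (16 concrete cases).
set_option maxRecDepth 8192 in
theorem base_eq (u l n s : Bool) :
    build_character_pool u l n s false = build_character_pool_alt u l n s false := by
  cases u <;> cases l <;> cases n <;> cases s <;> decide

theorem A_true_eq (u l n s : Bool) :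
    build_character_pool u l n s true
      = String.ofList ((build_character_pool u l n s false).toList.filter
          (fun x => !("0Ol1I".toList.contains x))) := by
  simp only [build_character_pool, if_pos, Bool.false_eq_true, if_false, foldl_replace]

theorem B_true_eq (u l n s : Bool) :
    build_character_pool_alt u l n s true
      = String.ofList ((build_character_pool_alt u l n s false).toList.filter
          (fun x => !("0Ol1I".toList.contains x))) := by
  rw [B_eq_filter, B_eq_filter]
  simp only [String.toList_ofList, List.filter_filter]
  congr 1
  apply List.filter_congr
  intro x _
  cases h : pvClassEnabled x u l n s <;> simp

-- ===== VERDICT (by name: the statement is the Claim_ definition above) =====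
theorem build_character_pool_spec : Claim_equal_build_character_pool := by
  unfold Claim_equal_build_character_pool
  intro u l n s e _
  unfold Spec_build_character_pool
  cases e
  · exact base_eq u l n s
  · rw [A_true_eq, B_true_eq, base_eq]
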